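-- pv_equiv track=rewrite | github.com/ignatovegors/greedy-algorithms | diff-terms.py | dif_terms
-- ===== SOURCE A (Python) =====
-- def dif_terms(n):
--     res = []
--     i = 1
--     while n - i >= i + 1:
--         res.append(i)
--         n -= i
--         i += 1
--     else:
--         res.append(n)
--
--     return res
-- ===== SOURCE B (Python) =====
-- def dif_terms(n):
--     # Find the number k of consecutive terms 1..k that fit, by a threshold test
--     # on triangular numbers ((k+1)(k+2) <= 2n), then emit them with range and
--     # absorb the remainder into the last term in closed form.
--     k = 0
--     while (k + 2) * (k + 3) <= 2 * n:
--         k += 1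
--     return list(range(1, k + 1)) + [n - k * (k + 1) // 2]
-- ===== Notes on version B (the rewrite author's own statement) =====
-- stated objective: alternative
-- what changed: Instead of repeatedly subtracting the current term from n and appending term by term, B counts how many consecutive terms fit via a triangular-number threshold test ((k+1)(k+2) <= 2n) and then builds the answer as range(1, k+1) plus a closed-form remainder n - k(k+1)//2.
import Mathlib
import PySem

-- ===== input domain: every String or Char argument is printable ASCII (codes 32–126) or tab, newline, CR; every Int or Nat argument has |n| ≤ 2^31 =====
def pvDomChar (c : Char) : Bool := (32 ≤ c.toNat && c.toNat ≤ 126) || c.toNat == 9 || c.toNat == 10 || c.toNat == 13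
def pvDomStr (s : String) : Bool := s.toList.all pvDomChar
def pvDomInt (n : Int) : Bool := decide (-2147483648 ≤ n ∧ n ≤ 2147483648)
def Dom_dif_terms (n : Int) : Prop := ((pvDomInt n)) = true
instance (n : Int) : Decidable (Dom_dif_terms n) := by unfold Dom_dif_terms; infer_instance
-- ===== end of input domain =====

-- B replaces A's subtract-and-append loop by a triangular-number threshold count k,
-- then builds range(1,k+1) plus a closed-form remainder; same asymptotic cost (alternative).

-- ===== PORT A =====
-- A's while loop; the counter i (which starts at 1 and only increases) is carried as 1 + j, j : Nat.
def difTermsGo (n : Int) (j : Nat) (res : List Int) : List Int :=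
  if n - (1 + (j : Int)) ≥ (1 + (j : Int)) + 1 then
    difTermsGo (n - (1 + (j : Int))) (j + 1) (res ++ [1 + (j : Int)])
  else
    res ++ [n]
termination_by (n - 2 * (1 + (j : Int))).toNat
decreasing_by
  push_cast
  omega

def dif_terms (n : Int) : List Int := difTermsGo n 0 []

-- ===== PORT B =====
-- B's counting loop: while (k+2)*(k+3) <= 2*n: k += 1
def countK (n : Int) (k : Nat) : Nat :=
  if ((k : Int) + 2) * ((k : Int) + 3) ≤ 2 * n then countK n (k + 1) else k
termination_by (2 * n + 1 - ((k : Int) + 2) * ((k : Int) + 3)).toNat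
decreasing_by
  rename_i hc
  have e2 : (((k + 1 : Nat)) : Int) = (k : Int) + 1 := by push_cast; ring
  rw [e2]
  have e1 : ((k : Int) + 2) * ((k : Int) + 3) = (k : Int) * (k : Int) + 5 * (k : Int) + 6 := by ring
  have e3 : ((k : Int) + 1 + 2) * ((k : Int) + 1 + 3) = (k : Int) * (k : Int) + 7 * (k : Int) + 12 := by ring
  rw [e1] at hc
  rw [e1, e3]
  generalize (k : Int) * (k : Int) = p at *
  omega

def dif_terms_alt (n : Int) : List Int :=
  PySem.List.pyRange 1 ((countK n 0 : Int) + 1) 1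
    ++ [n - PySem.Int.floordiv ((countK n 0 : Int) * ((countK n 0 : Int) + 1)) 2]

-- ===== PRECONDITION & SPEC =====
def Spec_dif_terms (n : Int) (out : List Int) : Prop := out = dif_terms_alt n
instance (n : Int) (out : List Int) : Decidable (Spec_dif_terms n out) := by unfold Spec_dif_terms; infer_instance

-- ===== CLAIM (what is proved, stated in full; the proofs are below) =====
def Claim_equal_dif_terms : Prop := ∀ (n : Int), Dom_dif_terms n → Spec_dif_terms n (dif_terms n)

-- ===== LEMMAS AND PROOFS =====

-- triangular numbers: the total subtracted from n after j completed iterations of A's loop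
def triT : Nat → Int
  | 0 => 0
  | j + 1 => triT j + ((j : Int) + 1)

theorem two_triT (j : Nat) : 2 * triT j = (j : Int) * ((j : Int) + 1) := by
  induction j with
  | zero => simp [triT]
  | succ j ih => simp only [triT]; push_cast; push_cast at ih; ring_nf; ring_nf at ih; omega

theorem countK_ge (n : Int) (k : Nat) : k ≤ countK n k := by
  fun_induction countK n k with
  | case1 k hc ih => omega
  | case2 k hc => omega

theorem go_eq (n0 : Int) (j : Nat) (res : List Int) :
    difTermsGo (n0 - triT j) j res
      = res ++ PySem.List.pyRange ((j : Int) + 1) ((countK n0 j : Int) + 1) 1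
            ++ [n0 - triT (countK n0 j)] := by
  fun_induction countK n0 j generalizing res with
  | case1 j hc ih =>
    have ht := two_triT j
    have hcond : n0 - triT j - (1 + (j : Int)) ≥ (1 + (j : Int)) + 1 := by
      have hx : ((j : Int) + 2) * ((j : Int) + 3)
          = (j : Int) * ((j : Int) + 1) + (4 * (j : Int) + 6) := by ring
      linarith
    rw [difTermsGo, if_pos hcond]
    have hstep : n0 - triT j - (1 + (j : Int)) = n0 - triT (j + 1) := by
      simp only [triT]; ring
    rw [hstep, ih (res ++ [1 + (j : Int)])]
    have hge : (j : Int) + 1 < (countK n0 (j + 1) : Int) + 1 := by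
      have := countK_ge n0 (j + 1); omega
    rw [PySem.List.pyRange_one_cons (a := (j : Int) + 1) (b := (countK n0 (j + 1) : Int) + 1) hge]
    simp only [List.append_assoc, List.cons_append, List.nil_append]
    push_cast
    ring_nf
  | case2 j hc =>
    have ht := two_triT j
    have hcond : ¬ (n0 - triT j - (1 + (j : Int)) ≥ (1 + (j : Int)) + 1) := by
      rw [not_le] at hc; rw [not_le]
      have hx : ((j : Int) + 2) * ((j : Int) + 3)
          = (j : Int) * ((j : Int) + 1) + (4 * (j : Int) + 6) := by ring
      linarith
    rw [difTermsGo, if_neg hcond]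
    rw [PySem.List.pyRange_one_eq_nil (by omega)]
    simp

-- ===== VERDICT (by name: the statement is the Claim_ definition above) =====
theorem dif_terms_spec : Claim_equal_dif_terms := by
  intro n _
  unfold Spec_dif_terms dif_terms dif_terms_alt
  have h := go_eq n 0 []
  simp only [triT, sub_zero, Nat.cast_zero, zero_add] at h
  rw [h]
  have hk : (countK n 0 : Int) * ((countK n 0 : Int) + 1) = 2 * triT (countK n 0) :=
    (two_triT (countK n 0)).symm
  rw [hk, PySem.Int.floordiv_eq_ediv_of_pos (by omega),
      Int.mul_ediv_cancel_left _ (by omega)]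
  simp
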